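-- pv_equiv track=rewrite | github.com/CodecraftsmanArslan/WEB-CRAWLERS | KYB_CRAWLERS/KYB-Crawlers-asl_crawlers_prod/custom_crawlers/kyb/lesotho/lesotho_kyb.py | process_contact_detail
-- ===== SOURCE A (Python) =====
-- def process_contact_detail(data):
--     def is_empty(value):
--         return value is None or any(keyword in value for keyword in ['[No Country Code] [No Area Code] [No Number]', '[No Area Code] [No Number]', '[Not Supplied]'])
--
--     def replace_area_code(value):
--         return value.replace('[No Area Code]', '').strip()
--
--     contact_detail = [
--         {"type": "phone_number", "value": replace_area_code(data.get('Telephone'))} if not is_empty(data.get('Telephone')) else {},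
--         {"type": "phone_number_2", "value": replace_area_code(data.get('Mobile'))} if not is_empty(data.get('Mobile')) else {},
--         {"type": "fax_number", "value": replace_area_code(data.get('Fax'))} if not is_empty(data.get('Fax')) else {},
--         {"type": ":e_mail", "value": data.get('Email')} if not is_empty(data.get('Email')) else {},
--         {"type": ":website", "value": data.get('Website')} if not is_empty(data.get('Website')) else {},
--         {"type": "main_phone_number", "value": replace_area_code(data.get('Telephone_2'))} if not is_empty(data.get('Telephone_2')) else {},
--         {"type": "main_phone_number_2", "value": replace_area_code(data.get('Mobile_2'))} if not is_empty(data.get('Mobile_2')) else {},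
--         {"type": "main_fax_number", "value": replace_area_code(data.get('Fax_2'))} if not is_empty(data.get('Fax_2')) else {},
--         {"type": ":main_mail", "value": data.get('Email_2')} if not is_empty(data.get('Email_2')) else {},
--         {"type": ":main_website", "value": data.get('Website_2')} if not is_empty(data.get('Website_2')) else {}
--     ]
--
--     return [item for item in contact_detail if item]  # Remove empty dictionaries from the list
-- ===== SOURCE B (Python) =====
-- def process_contact_detail(data):
--     def is_empty(value):
--         return value is None or any(keyword in value for keyword in ['[No Country Code] [No Area Code] [No Number]', '[No Area Code] [No Number]', '[Not Supplied]'])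
--
--     labels = {'Telephone': 'phone_number', 'Mobile': 'phone_number_2', 'Fax': 'fax_number',
--               'Email': ':e_mail', 'Website': ':website', 'Telephone_2': 'main_phone_number',
--               'Mobile_2': 'main_phone_number_2', 'Fax_2': 'main_fax_number',
--               'Email_2': ':main_mail', 'Website_2': ':main_website'}
--     # Single pass over the input: fill a slot for the first occurrence of each
--     # known field, cleaning phone/fax values as they are stored.
--     seen = set()
--     slots = {}
--     for key, value in data.items():
--         if key in labels and key not in seen:
--             seen.add(key)
--             if not is_empty(value):
--                 if key.startswith('Email') or key.startswith('Website'):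
--                     slots[key] = value
--                 else:
--                     slots[key] = value.replace('[No Area Code]', '').strip()
--     # Assemble the output in the fixed field order from the filled slots.
--     return [{"type": label, "value": slots[key]}
--             for key, label in labels.items() if key in slots]
-- ===== Notes on version B (the rewrite author's own statement) =====
-- stated objective: alternative
-- what changed: Instead of ten per-field lookups with conditional dict literals plus a final empty-dict filtering pass, B makes a single pass over the input filling a slot table (first occurrence of each known field wins, values cleaned on store) and then assembles the output from the slots in the fixed field order.
import Mathlib
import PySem

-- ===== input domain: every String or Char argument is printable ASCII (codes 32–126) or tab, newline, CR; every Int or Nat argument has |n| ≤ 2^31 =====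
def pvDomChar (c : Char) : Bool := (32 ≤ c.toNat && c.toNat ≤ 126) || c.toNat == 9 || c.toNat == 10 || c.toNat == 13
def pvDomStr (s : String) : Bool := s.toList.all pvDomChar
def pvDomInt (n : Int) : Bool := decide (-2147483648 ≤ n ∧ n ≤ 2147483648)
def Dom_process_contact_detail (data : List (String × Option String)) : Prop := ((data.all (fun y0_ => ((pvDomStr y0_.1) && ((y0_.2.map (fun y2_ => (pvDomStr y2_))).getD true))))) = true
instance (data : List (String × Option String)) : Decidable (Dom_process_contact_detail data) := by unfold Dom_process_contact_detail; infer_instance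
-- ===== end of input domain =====

-- B replaces A's ten per-field lookups with conditional dict literals plus a final
-- empty-dict filtering pass by a single pass over the input that fills a slot table
-- (first occurrence of each known field, values cleaned on store), then assembles the
-- output from the slots in the fixed field order (objective: alternative).

-- ===== PORT A =====
-- data.get(k): first-match lookup; the stored value may itself be None, so join flattens.
def pcdGetA (data : List (String × Option String)) (k : String) : Option String :=
  ((PySem.Dict.mk data).get? k).join

def pcdIsEmptyA (o : Option String) : Bool :=
  match o with
  | none => true
  | some v =>
      ["[No Country Code] [No Area Code] [No Number]",
       "[No Area Code] [No Number]", "[Not Supplied]"].any (fun kw => PySem.Str.isIn kw v)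

def pcdReplaceAreaCodeA (v : String) : String :=
  PySem.Str.strip (PySem.Str.replace v "[No Area Code]" "")

-- In every branch where is_empty is false the option is some, so '.getD ""' only
-- extracts that value (the default is unreachable), exact w.r.t. the Python.
def process_contact_detail (data : List (String × Option String)) : List (List (String × String)) :=
  let g := pcdGetA data
  let contact_detail : List (List (String × String)) := [
    (if !pcdIsEmptyA (g "Telephone") then [("type","phone_number"),("value", pcdReplaceAreaCodeA ((g "Telephone").getD ""))] else []),
    (if !pcdIsEmptyA (g "Mobile") then [("type","phone_number_2"),("value", pcdReplaceAreaCodeA ((g "Mobile").getD ""))] else []),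
    (if !pcdIsEmptyA (g "Fax") then [("type","fax_number"),("value", pcdReplaceAreaCodeA ((g "Fax").getD ""))] else []),
    (if !pcdIsEmptyA (g "Email") then [("type",":e_mail"),("value", (g "Email").getD "")] else []),
    (if !pcdIsEmptyA (g "Website") then [("type",":website"),("value", (g "Website").getD "")] else []),
    (if !pcdIsEmptyA (g "Telephone_2") then [("type","main_phone_number"),("value", pcdReplaceAreaCodeA ((g "Telephone_2").getD ""))] else []),
    (if !pcdIsEmptyA (g "Mobile_2") then [("type","main_phone_number_2"),("value", pcdReplaceAreaCodeA ((g "Mobile_2").getD ""))] else []),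
    (if !pcdIsEmptyA (g "Fax_2") then [("type","main_fax_number"),("value", pcdReplaceAreaCodeA ((g "Fax_2").getD ""))] else []),
    (if !pcdIsEmptyA (g "Email_2") then [("type",":main_mail"),("value", (g "Email_2").getD "")] else []),
    (if !pcdIsEmptyA (g "Website_2") then [("type",":main_website"),("value", (g "Website_2").getD "")] else [])
  ]
  contact_detail.filter (fun item => !item.isEmpty)

-- ===== PORT B =====
def pcdIsEmptyB (o : Option String) : Bool :=
  match o with
  | none => true
  | some v =>
      ["[No Country Code] [No Area Code] [No Number]",
       "[No Area Code] [No Number]", "[Not Supplied]"].any (fun kw => PySem.Str.isIn kw v)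

-- key → output type label, in the fixed output order
def pcdLabels : List (String × String) := [
  ("Telephone","phone_number"), ("Mobile","phone_number_2"), ("Fax","fax_number"),
  ("Email",":e_mail"), ("Website",":website"), ("Telephone_2","main_phone_number"),
  ("Mobile_2","main_phone_number_2"), ("Fax_2","main_fax_number"),
  ("Email_2",":main_mail"), ("Website_2",":main_website")]

-- value cleaning on store: email/website fields are kept verbatim
def pcdClean (k v : String) : String :=
  if PySem.Str.startswith k "Email" || PySem.Str.startswith k "Website" then v
  else PySem.Str.strip (PySem.Str.replace v "[No Area Code]" "")

-- one step of the single pass: state = (seen keys, filled slots)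
def pcdStep (st : List String × List (String × String)) (kv : String × Option String) :
    List String × List (String × String) :=
  if ((pcdLabels.find? (fun p => p.1 == kv.1)).isSome && !(st.1.contains kv.1)) then
    (st.1 ++ [kv.1],
     if !pcdIsEmptyB kv.2 then st.2 ++ [(kv.1, pcdClean kv.1 (kv.2.getD ""))] else st.2)
  else st

def process_contact_detail_alt (data : List (String × Option String)) : List (List (String × String)) :=
  let slots := (data.foldl pcdStep ([], [])).2
  pcdLabels.foldr (fun p acc =>
    match slots.find? (fun q => q.1 == p.1) with
    | some q => [("type", p.2), ("value", q.2)] :: acc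
    | none => acc) []

-- ===== PRECONDITION & SPEC =====
def Spec_process_contact_detail (data : List (String × Option String)) (out : List (List (String × String))) : Prop := out = process_contact_detail_alt data
instance (data : List (String × Option String)) (out : List (List (String × String))) : Decidable (Spec_process_contact_detail data out) := by unfold Spec_process_contact_detail; infer_instance

-- ===== CLAIM (what is proved, stated in full; the proofs are below) =====
def Claim_equal_process_contact_detail : Prop := ∀ (data : List (String × Option String)), Dom_process_contact_detail data → Spec_process_contact_detail data (process_contact_detail data)

-- ===== LEMMAS AND PROOFS =====

theorem pcdStep_pos (st : List String × List (String × String)) (kv : String × Option String)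
    (hc : ((pcdLabels.find? (fun p => p.1 == kv.1)).isSome && !(st.1.contains kv.1)) = true) :
    pcdStep st kv = (st.1 ++ [kv.1],
      if !pcdIsEmptyB kv.2 then st.2 ++ [(kv.1, pcdClean kv.1 (kv.2.getD ""))] else st.2) := by
  unfold pcdStep; rw [if_pos hc]

theorem pcdStep_neg (st : List String × List (String × String)) (kv : String × Option String)
    (hc : ¬ (((pcdLabels.find? (fun p => p.1 == kv.1)).isSome && !(st.1.contains kv.1)) = true)) :
    pcdStep st kv = st := by
  unfold pcdStep; rw [if_neg hc]

-- Once a key has been seen, the pass never writes to its slot again.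
theorem pcd_fold_seen (data : List (String × Option String))
    (seen : List String) (slots : List (String × String)) (k : String)
    (hk : k ∈ seen) :
    ((data.foldl pcdStep (seen, slots)).2.find? (fun q => q.1 == k))
      = slots.find? (fun q => q.1 == k) := by
  induction data generalizing seen slots with
  | nil => rfl
  | cons kv rest ih =>
    rw [List.foldl_cons]
    by_cases hc : (((pcdLabels.find? (fun p => p.1 == kv.1)).isSome && !(seen.contains kv.1)) = true)
    · rw [pcdStep_pos _ _ hc]
      have h2 : kv.1 ∉ seen := by
        rw [Bool.and_eq_true] at hc
        simpa using hc.2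
      have hne : (kv.1 == k) = false := by
        simp only [beq_eq_false_iff_ne]
        intro he; exact h2 (he ▸ hk)
      rw [ih (seen ++ [kv.1]) _ (List.mem_append.mpr (Or.inl hk))]
      cases hv : pcdIsEmptyB kv.2 with
      | false => simp [List.find?_append, List.find?, hne]
      | true => simp
    · rw [pcdStep_neg _ _ hc]
      exact ih seen slots hk

-- The slot of an unseen, unfilled key after the pass is exactly A's per-field result.
theorem pcd_fold_slot (data : List (String × Option String))
    (seen : List String) (slots : List (String × String)) (k : String)
    (hint : (pcdLabels.find? (fun p => p.1 == k)).isSome = true)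
    (hseen : k ∉ seen)
    (hslot : slots.find? (fun q => q.1 == k) = none) :
    ((data.foldl pcdStep (seen, slots)).2.find? (fun q => q.1 == k))
      = (if !pcdIsEmptyA ((PySem.Dict.mk data).get? k).join
         then some (k, pcdClean k ((((PySem.Dict.mk data).get? k).join).getD ""))
         else none) := by
  induction data generalizing seen slots with
  | nil => rw [List.foldl_nil, hslot]; rfl
  | cons kv rest ih =>
    rw [List.foldl_cons]
    by_cases hkk : (kv.1 == k) = true
    · have hkeq : kv.1 = k := eq_of_beq hkk
      have hcontains : seen.contains kv.1 = false := by rw [hkeq]; simpa using hseen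
      have hc : (((pcdLabels.find? (fun p => p.1 == kv.1)).isSome && !(seen.contains kv.1)) = true) := by
        rw [hkeq] at hcontains ⊢
        rw [hint, hcontains]
        rfl
      rw [pcdStep_pos _ _ hc]
      have hget : ((PySem.Dict.mk (kv :: rest)).get? k).join = kv.2 := by
        obtain ⟨k1, v1⟩ := kv
        simp only at hkeq
        simp [PySem.Dict.get?_mk_cons, hkeq]
      rw [pcd_fold_seen rest _ _ k (List.mem_append.mpr (Or.inr (by simp [hkeq])))]
      rw [hget]
      cases hv : pcdIsEmptyB kv.2 with
      | true =>
        have hvA : pcdIsEmptyA kv.2 = true := hv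
        simp [hvA, hslot]
      | false =>
        have hvA : pcdIsEmptyA kv.2 = false := hv
        simp [hvA, List.find?_append, hslot, List.find?, hkk, hkeq]
    · have hget : ((PySem.Dict.mk (kv :: rest)).get? k).join
          = ((PySem.Dict.mk rest).get? k).join := by
        obtain ⟨k1, v1⟩ := kv
        simp only at hkk
        simp [PySem.Dict.get?_mk_cons, hkk]
      rw [hget]
      have hne : kv.1 ≠ k := by simpa using hkk
      have hkk' : (kv.1 == k) = false := by simpa using hkk
      by_cases hc : (((pcdLabels.find? (fun p => p.1 == kv.1)).isSome && !(seen.contains kv.1)) = true)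
      · rw [pcdStep_pos _ _ hc]
        have hseen' : k ∉ seen ++ [kv.1] := by
          intro h
          rcases List.mem_append.mp h with h1 | h1
          · exact hseen h1
          · have hk1 : k = kv.1 := by simpa using h1
            exact hne hk1.symm
        cases hv : pcdIsEmptyB kv.2 with
        | false =>
          simp only [hv, Bool.not_false, if_pos]
          exact ih _ _ hseen' (by simp [List.find?_append, hslot, List.find?, hkk'])
        | true =>
          simp only [hv, Bool.not_true, Bool.false_eq_true, if_neg, not_false_iff]
          exact ih _ _ hseen' hslot
      · rw [pcdStep_neg _ _ hc]
        exact ih seen slots hseen hslot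

-- The back-to-front assembly over the label table equals a map-then-filter.
theorem pcd_assemble_eq (labels : List (String × String)) (slots : List (String × String)) :
    labels.foldr (fun p acc =>
      match slots.find? (fun q => q.1 == p.1) with
      | some q => [("type", p.2), ("value", q.2)] :: acc
      | none => acc) []
    = (labels.map (fun p =>
        match slots.find? (fun q => q.1 == p.1) with
        | some q => [("type", p.2), ("value", q.2)]
        | none => ([] : List (String × String)))).filter (fun item => !item.isEmpty) := by
  induction labels with
  | nil => rfl
  | cons p rest ih =>
    simp only [List.foldr_cons, List.map_cons, List.filter_cons]
    cases h : slots.find? (fun q => q.1 == p.1) with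
    | none => simp [h, ih]
    | some q => simp [h, ih, List.isEmpty]

-- One output entry, for a field whose value is cleaned (phone/fax keys).
theorem pcd_entry_replace (lbl k : String) (v : Option String)
    (h : ∀ x, pcdClean k x = pcdReplaceAreaCodeA x) :
    (match (if !pcdIsEmptyA v then some (k, pcdClean k (v.getD "")) else none) with
     | some q => [("type", lbl), ("value", q.2)]
     | none => ([] : List (String × String)))
    = (if !pcdIsEmptyA v then [("type", lbl), ("value", pcdReplaceAreaCodeA (v.getD ""))] else []) := by
  cases hv : pcdIsEmptyA v <;> simp [hv, h]

-- One output entry, for a field whose value is kept verbatim (email/website keys).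
theorem pcd_entry_id (lbl k : String) (v : Option String)
    (h : ∀ x, pcdClean k x = x) :
    (match (if !pcdIsEmptyA v then some (k, pcdClean k (v.getD "")) else none) with
     | some q => [("type", lbl), ("value", q.2)]
     | none => ([] : List (String × String)))
    = (if !pcdIsEmptyA v then [("type", lbl), ("value", v.getD "")] else []) := by
  cases hv : pcdIsEmptyA v <;> simp [hv, h]

-- ===== VERDICT (by name: the statement is the Claim_ definition above) =====
theorem process_contact_detail_spec : Claim_equal_process_contact_detail := by
  intro data _
  unfold Spec_process_contact_detail process_contact_detail process_contact_detail_alt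
  rw [pcd_assemble_eq]
  simp only [pcdLabels, List.map_cons, List.map_nil]
  rw [pcd_fold_slot data [] [] "Telephone" (by decide) (by simp) rfl,
      pcd_fold_slot data [] [] "Mobile" (by decide) (by simp) rfl,
      pcd_fold_slot data [] [] "Fax" (by decide) (by simp) rfl,
      pcd_fold_slot data [] [] "Email" (by decide) (by simp) rfl,
      pcd_fold_slot data [] [] "Website" (by decide) (by simp) rfl,
      pcd_fold_slot data [] [] "Telephone_2" (by decide) (by simp) rfl,
      pcd_fold_slot data [] [] "Mobile_2" (by decide) (by simp) rfl,
      pcd_fold_slot data [] [] "Fax_2" (by decide) (by simp) rfl,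
      pcd_fold_slot data [] [] "Email_2" (by decide) (by simp) rfl,
      pcd_fold_slot data [] [] "Website_2" (by decide) (by simp) rfl]
  rw [pcd_entry_replace _ "Telephone" _ (fun x => rfl),
      pcd_entry_replace _ "Mobile" _ (fun x => rfl),
      pcd_entry_replace _ "Fax" _ (fun x => rfl),
      pcd_entry_id _ "Email" _ (fun x => rfl),
      pcd_entry_id _ "Website" _ (fun x => rfl),
      pcd_entry_replace _ "Telephone_2" _ (fun x => rfl),
      pcd_entry_replace _ "Mobile_2" _ (fun x => rfl),
      pcd_entry_replace _ "Fax_2" _ (fun x => rfl),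
      pcd_entry_id _ "Email_2" _ (fun x => rfl),
      pcd_entry_id _ "Website_2" _ (fun x => rfl)]
  rfl
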